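-- pv_equiv track=rewrite | github.com/soheshdoshi/Ds-Algo | SegmentTree/CountPrime.py | solve
-- ===== SOURCE A (Python) =====
-- from math import ceil, floor, log
--
-- MAX = 1000000
--
-- def sieveOfEratosthenes(isPrime):
--     isPrime[1] = False
--
--     for k in range(2, MAX + 1):
--         if k * k > MAX:
--             break
--         if isPrime[k] == True:
--             for i in range(2 * k, MAX + 1, k):
--                 isPrime[i] = False
--
-- class SegmentTree:
--
--     def __init__(self, A, isPrime):
--         self.size = len(A)
--         self.A = A
--         self.maxSizeSeg = 2 * pow(2, ceil(log(self.size, 2))) - 1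
--         self.segTree = [0] * self.maxSizeSeg
--         self.isPrime = isPrime
--         self.__build_segTree(0, 0, self.size - 1)
--
--     def __build_segTree(self, treeIndex, left, right):
--         if left == right:
--             if self.isPrime[self.A[left]]:
--                 self.segTree[treeIndex] = 1
--             else:
--                 self.segTree[treeIndex] = 0
--             return self.segTree[treeIndex]
--         else:
--             mid = left + (right - left) // 2
--             self.segTree[treeIndex] = self.__build_segTree(treeIndex * 2 + 1, left, mid) + \
--                                       self.__build_segTree(treeIndex * 2 + 2, mid + 1, right)
--             return self.segTree[treeIndex]
--
--     def updateValue(self, updateIndex, value):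
--         if updateIndex < 0 or updateIndex > self.size - 1:
--             return
--         difference, oldValue = 0, 0
--         oldValue = self.A[updateIndex]
--         self.A[updateIndex] = value
--
--         # case 1: old and new values both are primes
--         if self.isPrime[oldValue] and self.isPrime[value]:
--             return
--         # case 2: old and new values both non-primes
--         if ((not self.isPrime[oldValue])) and (not self.isPrime[value]):
--             return
--
--         # case 3: old value was prime , new value is non prime
--         if self.isPrime[oldValue] and not self.isPrime[value]:
--             difference = -1
--
--         if not self.isPrime[oldValue] and self.isPrime[value]:
--             difference = 1
--
--         self.__update_segTree(0, 0, self.size - 1, updateIndex, difference)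
--
--     def __update_segTree(self, treeIndex, left, right, updateIndex, difference):
--
--         if updateIndex < left or updateIndex > right:
--             return
--         self.segTree[treeIndex] = self.segTree[treeIndex] + difference
--
--         if (left != right):
--             mid = left + (right - left) // 2
--             self.__update_segTree(treeIndex * 2 + 1, left, mid, updateIndex, difference)
--             self.__update_segTree(treeIndex * 2 + 2, mid + 1, right, updateIndex, difference)
--
--     def query(self, leftR, rightR):
--         return self.__query_segTree(leftR, rightR, 0, 0, self.size - 1)
--
--     def __query_segTree(self, leftR, rightR, treeIndex, left, right):
--         if leftR <= left and rightR >= right: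
--             return self.segTree[treeIndex]
--         if right < leftR or left > rightR:
--             return 0
--         mid = left + (right - left) // 2
--         return self.__query_segTree(leftR, rightR, treeIndex * 2 + 1, left, mid) + \
--                self.__query_segTree(leftR, rightR, treeIndex * 2 + 2, mid + 1, right)
--
-- def solve(A, B, C, D):
--
--     isPrime = [True] * (MAX + 1)
--     sieveOfEratosthenes(isPrime)
--
--     seg = SegmentTree(A, isPrime)
--
--     result = []
--     for i in range(len(B)):
--         if B[i] == "C":
--             index, value = C[i] - 1, D[i]
--             seg.updateValue(index, value)
--         else:
--             start, end = C[i] - 1, D[i] - 1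
--
--             result.append(seg.query(start, end))
--     return result
-- ===== SOURCE B (Python) =====
-- # Simpler: replaces the segment tree with a flat 0/1 prime mask and direct range sums
-- # (same sieve lookup). Return-value equivalence only: A mutates its argument A in place, B does not.
-- MAX = 1000000
--
-- def sieveOfEratosthenes(isPrime):
--     isPrime[1] = False
--     for k in range(2, MAX + 1):
--         if k * k > MAX:
--             break
--         if isPrime[k] == True:
--             for i in range(2 * k, MAX + 1, k):
--                 isPrime[i] = False
--
-- def solve(A, B, C, D):
--     isPrime = [True] * (MAX + 1)
--     sieveOfEratosthenes(isPrime)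
--     n = len(A)
--     mask = [1 if isPrime[a] else 0 for a in A]
--     result = []
--     for i in range(len(B)):
--         if B[i] == "C":
--             idx = C[i] - 1
--             if 0 <= idx < n:
--                 mask[idx] = 1 if isPrime[D[i]] else 0
--         else:
--             lo, hi = max(C[i] - 1, 0), min(D[i] - 1, n - 1)
--             result.append(sum(mask[lo:hi + 1]) if hi >= lo else 0)
--     return result
-- ===== Notes on version B (the rewrite author's own statement) =====
-- stated objective: simpler
-- what changed: Replaces the recursive segment tree (build/update/query over an implicit binary tree) with a flat 0/1 prime-mask list: point updates write the mask cell directly and each range query is a direct clamped range sum, so all tree machinery disappears.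
import Mathlib
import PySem

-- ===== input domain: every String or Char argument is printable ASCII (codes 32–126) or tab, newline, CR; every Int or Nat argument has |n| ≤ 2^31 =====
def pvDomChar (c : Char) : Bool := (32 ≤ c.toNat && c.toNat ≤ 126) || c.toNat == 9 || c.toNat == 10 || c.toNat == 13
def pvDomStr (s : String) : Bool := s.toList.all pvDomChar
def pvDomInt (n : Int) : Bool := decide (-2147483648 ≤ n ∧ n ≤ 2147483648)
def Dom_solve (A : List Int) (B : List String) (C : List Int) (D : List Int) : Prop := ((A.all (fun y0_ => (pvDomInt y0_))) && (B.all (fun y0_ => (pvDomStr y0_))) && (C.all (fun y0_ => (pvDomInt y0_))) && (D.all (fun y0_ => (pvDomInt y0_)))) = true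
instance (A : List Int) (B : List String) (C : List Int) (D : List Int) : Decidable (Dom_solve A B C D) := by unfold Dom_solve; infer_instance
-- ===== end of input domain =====

-- B replaces A's segment tree with a flat 0/1 prime-mask and direct clamped range sums (simpler; not faster).
-- Equivalence is about the RETURN value only: Python A mutates its argument A in place, B does not.

-- ===== PORT A =====

def pvMAX : Nat := 1000000

-- inner loop of sieveOfEratosthenes: 'for i in range(2*k, MAX+1, k): isPrime[i] = False'
def sieveMark (a : Array Bool) (k : Nat) : Array Bool :=
  (PySem.List.pyRange (2 * (k : Int)) ((pvMAX : Int) + 1) (k : Int)).foldl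
    (fun a i => a.set! i.toNat false) a

-- outer loop with the 'if k*k > MAX: break'; fuel 2000 covers the whole loop (it breaks at k = 1001)
def sieveLoop : Nat → Array Bool → Nat → Array Bool
  | 0, a, _ => a
  | fuel + 1, a, k =>
    if k * k > pvMAX then a
    else sieveLoop fuel (if a.getD k false then sieveMark a k else a) (k + 1)

-- isPrime = [True]*(MAX+1); sieveOfEratosthenes(isPrime)   (note: leaves isPrime[0] True, as Python does)
def pySieve : Array Bool := sieveLoop 2000 ((Array.replicate (pvMAX + 1) true).set! 1 false) 2

-- isPrime[v]: Python list indexing; exact for -(MAX+1) ≤ v ≤ MAX (Pre_ excludes the rest, where Python raises IndexError)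
def primeAt (v : Int) : Bool := pySieve.getD (PySem.Int.mod v ((pvMAX : Int) + 1)).toNat false

-- mid = left + (right - left) // 2
def segMid (l r : Int) : Int := l + PySem.Int.floordiv (r - l) 2

-- __build_segTree; the tree is a store Nat → Int ([0]*maxSizeSeg: every cell starts 0; the allocation bound
-- 2*2^ceil(log2 n)-1 is never exceeded by the recursion, so the store is exact where Python returns).
-- fuel makes the recursion total; fuel > r-l is supplied at every call, so it never runs out where Python returns.
def buildSeg : Nat → List Int → Nat → Int → Int → (Nat → Int) → (Nat → Int) × Int
  | 0, _, _, _, _, t => (t, 0)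
  | fuel + 1, vals, ti, l, r, t =>
    if l == r then
      let v : Int := if primeAt (PySem.List.pyGetD vals l 0) then 1 else 0
      (Function.update t ti v, v)
    else
      let mid := segMid l r
      let p1 := buildSeg fuel vals (2 * ti + 1) l mid t
      let p2 := buildSeg fuel vals (2 * ti + 2) (mid + 1) r p1.1
      (Function.update p2.1 ti (p1.2 + p2.2), p1.2 + p2.2)

-- __update_segTree
def updateSeg : Nat → (Nat → Int) → Nat → Int → Int → Int → Int → (Nat → Int)
  | 0, t, _, _, _, _, _ => t
  | fuel + 1, t, ti, l, r, updateIndex, difference =>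
    if updateIndex < l ∨ updateIndex > r then t
    else
      let t' := Function.update t ti (t ti + difference)
      if l ≠ r then
        let mid := segMid l r
        updateSeg fuel (updateSeg fuel t' (2 * ti + 1) l mid updateIndex difference)
          (2 * ti + 2) (mid + 1) r updateIndex difference
      else t'

-- __query_segTree
def querySeg : Nat → (Nat → Int) → Int → Int → Nat → Int → Int → Int
  | 0, _, _, _, _, _, _ => 0
  | fuel + 1, t, lR, rR, ti, l, r =>
    if lR ≤ l ∧ rR ≥ r then t ti
    else if r < lR ∨ l > rR then 0
    else
      let mid := segMid l r
      querySeg fuel t lR rR (2 * ti + 1) l mid + querySeg fuel t lR rR (2 * ti + 2) (mid + 1) r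

-- updateValue
def updateValue (fuel : Nat) (n : Int) (vals : List Int) (t : Nat → Int)
    (updateIndex value : Int) : List Int × (Nat → Int) :=
  if updateIndex < 0 ∨ updateIndex > n - 1 then (vals, t)
  else
    let oldValue := PySem.List.pyGetD vals updateIndex 0
    let vals' := vals.set updateIndex.toNat value
    if primeAt oldValue && primeAt value then (vals', t)
    else if !primeAt oldValue && !primeAt value then (vals', t)
    else
      let d1 : Int := if primeAt oldValue && !primeAt value then -1 else 0
      let difference : Int := if !primeAt oldValue && primeAt value then 1 else d1
      (vals', updateSeg fuel t 0 0 (n - 1) updateIndex difference)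

-- loop body of solve (state: (A, segTree, result))
def stepA (Bs : List String) (Cs Ds : List Int) (n : Int) (fuel : Nat)
    (s : List Int × (Nat → Int) × List Int) (i : Int) : List Int × (Nat → Int) × List Int :=
  if PySem.List.pyGetD Bs i "" == "C" then
    let index := PySem.List.pyGetD Cs i 0 - 1
    let value := PySem.List.pyGetD Ds i 0
    let p := updateValue fuel n s.1 s.2.1 index value
    (p.1, p.2, s.2.2)
  else
    let start := PySem.List.pyGetD Cs i 0 - 1
    let stop := PySem.List.pyGetD Ds i 0 - 1
    (s.1, s.2.1, s.2.2 ++ [querySeg fuel s.2.1 start stop 0 0 (n - 1)])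

def solve (A : List Int) (B : List String) (C : List Int) (D : List Int) : List Int :=
  let n : Int := (A.length : Int)
  let fuel : Nat := (n - 1).toNat + 1
  let t0 := (buildSeg fuel A 0 0 (n - 1) (fun _ => 0)).1
  ((PySem.List.pyRange 0 (B.length : Int) 1).foldl (stepA B C D n fuel) (A, t0, [])).2.2

-- ===== PORT B =====

-- 1 if isPrime[v] else 0
def maskBit (v : Int) : Int := if primeAt v then 1 else 0

-- sum(mask[lo:hi+1]) if hi >= lo else 0
def sliceSum (m : List Int) (lo hi : Int) : Int :=
  if hi ≥ lo then (PySem.List.slice m (some lo) (some (hi + 1))).sum else 0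

-- loop body of B's solve (state: (mask, result))
def stepB (Bs : List String) (Cs Ds : List Int) (n : Int)
    (s : List Int × List Int) (i : Int) : List Int × List Int :=
  if PySem.List.pyGetD Bs i "" == "C" then
    let idx := PySem.List.pyGetD Cs i 0 - 1
    if 0 ≤ idx ∧ idx < n then (s.1.set idx.toNat (maskBit (PySem.List.pyGetD Ds i 0)), s.2)
    else s
  else
    let lo := max (PySem.List.pyGetD Cs i 0 - 1) 0
    let hi := min (PySem.List.pyGetD Ds i 0 - 1) (n - 1)
    (s.1, s.2 ++ [sliceSum s.1 lo hi])

def solve_alt (A : List Int) (B : List String) (C : List Int) (D : List Int) : List Int :=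
  let n : Int := (A.length : Int)
  ((PySem.List.pyRange 0 (B.length : Int) 1).foldl (stepB B C D n) (A.map maskBit, [])).2

-- ===== PRECONDITION & SPEC =====

-- Pre_ excludes exactly the inputs where Python A raises: empty A (ValueError from log(0)),
-- an op index beyond len(C)/len(D) (IndexError), and a sieve lookup isPrime[v] with v outside
-- [-(MAX+1), MAX] (IndexError) — i.e. any element of A, or the new value of an update whose
-- target index is in range.
def Pre_solve (A : List Int) (B : List String) (C : List Int) (D : List Int) : Prop :=
  A ≠ [] ∧ B.length ≤ C.length ∧ B.length ≤ D.length ∧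
  (∀ a ∈ A, -1000001 ≤ a ∧ a ≤ 1000000) ∧
  (∀ i < B.length,
    (B.getD i "" = "C" ∧ 1 ≤ C.getD i 0 ∧ C.getD i 0 ≤ (A.length : Int)) →
    (-1000001 ≤ D.getD i 0 ∧ D.getD i 0 ≤ 1000000))
instance (A : List Int) (B : List String) (C : List Int) (D : List Int) : Decidable (Pre_solve A B C D) := by
  unfold Pre_solve; infer_instance

def pvWitness_solve : List Int × List String × List Int × List Int :=
  ([2, 4, 7], ["Q", "C", "Q"], [1, 2, 2], [3, 6, 3])

def Spec_solve (A : List Int) (B : List String) (C : List Int) (D : List Int) (out : List Int) : Prop := out = solve_alt A B C D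
instance (A : List Int) (B : List String) (C : List Int) (D : List Int) (out : List Int) : Decidable (Spec_solve A B C D out) := by unfold Spec_solve; infer_instance

-- ===== CLAIM (what is proved, stated in full; the proofs are below) =====
def Claim_equal_solve : Prop := ∀ (A : List Int) (B : List String) (C : List Int) (D : List Int), Dom_solve A B C D → Pre_solve A B C D → Spec_solve A B C D (solve A B C D)

-- ===== LEMMAS AND PROOFS =====

-- proof-side range sum (what each tree node stores, and what sliceSum computes)
def sumMask (m : List Int) (lo hi : Int) : Int :=
  ((PySem.List.pyRange lo (hi + 1) 1).map (fun j => PySem.List.pyGetD m j 0)).sum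

-- ===== descendant relation on tree indices =====
def desc (i : Nat) : Nat → Prop
  | 0 => i = 0
  | j + 1 => i = j + 1 ∨ desc i (j / 2)
termination_by j => j
decreasing_by omega

lemma desc_iff (i j : Nat) : desc i j ↔ (i = j ∨ (j ≠ 0 ∧ desc i ((j - 1) / 2))) := by
  cases j with
  | zero => simp [desc]
  | succ j => rw [desc]; constructor
              · rintro (h | h); exact Or.inl h; exact Or.inr ⟨by omega, by simpa using h⟩
              · rintro (h | ⟨_, h⟩); exact Or.inl h; exact Or.inr (by simpa using h)

lemma desc_refl (i : Nat) : desc i i := (desc_iff i i).mpr (Or.inl rfl)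

lemma desc_le {i j : Nat} (h : desc i j) : i ≤ j := by
  induction j using Nat.strong_induction_on with
  | _ j ih =>
    rcases (desc_iff i j).mp h with h | ⟨h0, h⟩
    · omega
    · have := ih ((j - 1) / 2) (by omega) h; omega

lemma desc_step {i j : Nat} (h0 : j ≠ 0) (h : desc i ((j - 1) / 2)) : desc i j :=
  (desc_iff i j).mpr (Or.inr ⟨h0, h⟩)

lemma desc_child_left (i : Nat) : desc i (2 * i + 1) := by
  apply desc_step (by omega)
  have : (2 * i + 1 - 1) / 2 = i := by omega
  rw [this]; exact desc_refl i

lemma desc_child_right (i : Nat) : desc i (2 * i + 2) := by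
  apply desc_step (by omega)
  have : (2 * i + 2 - 1) / 2 = i := by omega
  rw [this]; exact desc_refl i

lemma desc_trans {a b c : Nat} (h1 : desc a b) (h2 : desc b c) : desc a c := by
  induction c using Nat.strong_induction_on with
  | _ c ih =>
    rcases (desc_iff b c).mp h2 with h | ⟨h0, h⟩
    · exact h ▸ h1
    · exact desc_step h0 (ih ((c - 1) / 2) (by omega) h)

lemma desc_disjoint {i j : Nat} (h1 : desc (2 * i + 1) j) (h2 : desc (2 * i + 2) j) : False := by
  induction j using Nat.strong_induction_on with
  | _ j ih =>
    rcases (desc_iff _ j).mp h1 with h1' | ⟨h0, h1'⟩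
    · rcases (desc_iff _ j).mp h2 with h2' | ⟨h0, h2'⟩
      · omega
      · have := desc_le h2'; omega
    · rcases (desc_iff _ j).mp h2 with h2' | ⟨_, h2'⟩
      · have := desc_le h1'; omega
      · exact ih ((j - 1) / 2) (by omega) h1' h2'

lemma not_desc_left {ti j : Nat} (h : ¬ desc ti j) : ¬ desc (2 * ti + 1) j :=
  fun hd => h (desc_trans (desc_child_left ti) hd)

lemma not_desc_right {ti j : Nat} (h : ¬ desc ti j) : ¬ desc (2 * ti + 2) j :=
  fun hd => h (desc_trans (desc_child_right ti) hd)

lemma ne_of_desc_left {ti j : Nat} (h : desc (2 * ti + 1) j) : j ≠ ti := by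
  have := desc_le h; omega

lemma ne_of_desc_right {ti j : Nat} (h : desc (2 * ti + 2) j) : j ≠ ti := by
  have := desc_le h; omega

-- ===== segMid bounds =====
lemma segMid_bounds {l r : Int} (h : l < r) : l ≤ segMid l r ∧ segMid l r < r := by
  unfold segMid
  rw [PySem.Int.floordiv_eq_ediv_of_pos (by omega : (0:Int) < 2)]
  omega

-- ===== sumMask lemmas =====
lemma sumMask_empty (m : List Int) {lo hi : Int} (h : hi < lo) : sumMask m lo hi = 0 := by
  unfold sumMask
  rw [PySem.List.pyRange_one_eq_nil (by omega)]
  simp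

lemma sumMask_singleton (m : List Int) (l : Int) : sumMask m l l = PySem.List.pyGetD m l 0 := by
  unfold sumMask
  rw [PySem.List.pyRange_one_singleton]
  simp

lemma sumMask_split (m : List Int) {a b : Int} (mid : Int) (h1 : a ≤ mid) (h2 : mid ≤ b + 1) :
    sumMask m a b = sumMask m a (mid - 1) + sumMask m mid b := by
  unfold sumMask
  rw [show mid - 1 + 1 = mid by ring, PySem.List.pyRange_one_append a mid (b + 1) h1 (by omega)]
  simp

lemma sumMask_congr {m m' : List Int} {lo hi : Int}
    (h : ∀ x, lo ≤ x → x ≤ hi → PySem.List.pyGetD m' x 0 = PySem.List.pyGetD m x 0) :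
    sumMask m' lo hi = sumMask m lo hi := by
  unfold sumMask
  congr 1
  apply List.map_congr_left
  intro x hx
  rw [PySem.List.mem_pyRange_one] at hx
  exact h x hx.1 (by omega)

-- unconditional clamped split (used by the query lemma)
lemma sumMask_clamp_split (m : List Int) (a b mid : Int) :
    sumMask m a (min b mid) + sumMask m (max a (mid + 1)) b = sumMask m a b := by
  by_cases hb : b ≤ mid
  · rw [show min b mid = b by omega, sumMask_empty m (show b < max a (mid + 1) by omega)]
    ring
  · by_cases ha : mid < a
    · rw [sumMask_empty m (show min b mid < a by omega), show max a (mid + 1) = a by omega]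
      ring
    · have e := sumMask_split m (a := a) (b := b) (mid + 1) (by omega) (by omega)
      rw [show mid + 1 - 1 = mid by ring] at e
      rw [show min b mid = mid by omega, show max a (mid + 1) = mid + 1 by omega, e]

lemma sumMask_add_at {m m' : List Int} {lo hi idx diff : Int}
    (h : ∀ x, lo ≤ x → x ≤ hi →
      PySem.List.pyGetD m' x 0 = PySem.List.pyGetD m x 0 + (if x = idx then diff else 0)) :
    sumMask m' lo hi = sumMask m lo hi + (if lo ≤ idx ∧ idx ≤ hi then diff else 0) := by
  by_cases hin : lo ≤ idx ∧ idx ≤ hi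
  · rw [if_pos hin]
    have e1 := sumMask_split m' (a := lo) (b := hi) idx (by omega) (by omega)
    have e2 := sumMask_split m' (a := idx) (b := hi) (idx + 1) (by omega) (by omega)
    have e3 := sumMask_split m (a := lo) (b := hi) idx (by omega) (by omega)
    have e4 := sumMask_split m (a := idx) (b := hi) (idx + 1) (by omega) (by omega)
    rw [show idx + 1 - 1 = idx by ring] at e2 e4
    have c1 : sumMask m' lo (idx - 1) = sumMask m lo (idx - 1) := by
      apply sumMask_congr
      intro x h1 h2
      rw [h x (by omega) (by omega), if_neg (by omega)]; ring
    have c2 : sumMask m' (idx + 1) hi = sumMask m (idx + 1) hi := by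
      apply sumMask_congr
      intro x h1 h2
      rw [h x (by omega) (by omega), if_neg (by omega)]; ring
    have c3 : sumMask m' idx idx = sumMask m idx idx + diff := by
      rw [sumMask_singleton, sumMask_singleton, h idx (by omega) (by omega), if_pos rfl]
    linarith
  · rw [if_neg hin, add_zero]
    apply sumMask_congr
    intro x h1 h2
    rw [h x h1 h2, if_neg (by omega)]; ring

-- ===== tree invariant: every node reachable in the subtree stores the sum of its range =====
def InvOn (t : Nat → Int) (m : List Int) (ti : Nat) (l r : Int) : Prop :=
  t ti = sumMask m l r ∧
  (∀ _ : l < r, InvOn t m (2 * ti + 1) l (segMid l r) ∧ InvOn t m (2 * ti + 2) (segMid l r + 1) r)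
termination_by (r - l).toNat
decreasing_by
  · have := segMid_bounds (by assumption); omega
  · have := segMid_bounds (by assumption); omega

lemma invOn_iff (t : Nat → Int) (m : List Int) (ti : Nat) (l r : Int) :
    InvOn t m ti l r ↔ (t ti = sumMask m l r ∧
      (∀ _ : l < r, InvOn t m (2 * ti + 1) l (segMid l r) ∧ InvOn t m (2 * ti + 2) (segMid l r + 1) r)) := by
  rw [InvOn]

lemma invOn_congr_tree : ∀ (fuel : Nat) {t t' : Nat → Int} {m : List Int} {ti : Nat} {l r : Int},
    (r - l).toNat < fuel →
    (∀ j, desc ti j → t' j = t j) → InvOn t m ti l r → InvOn t' m ti l r := by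
  intro fuel
  induction fuel with
  | zero => omega
  | succ fuel ih =>
    intro t t' m ti l r hf ht hInv
    rw [invOn_iff] at hInv ⊢
    refine ⟨by rw [ht ti (desc_refl ti)]; exact hInv.1, ?_⟩
    intro hlr
    have hm := segMid_bounds hlr
    refine ⟨ih (by omega) (fun j hj => ht j (desc_trans (desc_child_left ti) hj)) (hInv.2 hlr).1,
            ih (by omega) (fun j hj => ht j (desc_trans (desc_child_right ti) hj)) (hInv.2 hlr).2⟩

lemma invOn_congr_mask : ∀ (fuel : Nat) {t : Nat → Int} {m m' : List Int} {ti : Nat} {l r : Int},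
    (r - l).toNat < fuel →
    (∀ x, l ≤ x → x ≤ r → PySem.List.pyGetD m' x 0 = PySem.List.pyGetD m x 0) →
    InvOn t m ti l r → InvOn t m' ti l r := by
  intro fuel
  induction fuel with
  | zero => omega
  | succ fuel ih =>
    intro t m m' ti l r hf hm hInv
    rw [invOn_iff] at hInv ⊢
    refine ⟨by rw [sumMask_congr hm]; exact hInv.1, ?_⟩
    intro hlr
    have hb := segMid_bounds hlr
    refine ⟨ih (by omega) (fun x h1 h2 => hm x (by omega) (by omega)) (hInv.2 hlr).1,
            ih (by omega) (fun x h1 h2 => hm x (by omega) (by omega)) (hInv.2 hlr).2⟩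

lemma pyGetD_map_in {xs : List Int} (f : Int → Int) {i : Int}
    (h0 : 0 ≤ i) (h1 : i < (xs.length : Int)) (d d' : Int) :
    PySem.List.pyGetD (xs.map f) i d = f (PySem.List.pyGetD xs i d') := by
  rw [PySem.List.pyGetD_eq_getElem (xs.map f) d h0 (by simpa using h1),
      PySem.List.pyGetD_eq_getElem xs d' h0 h1]
  simp [List.getElem_map]

lemma buildSeg_inv : ∀ (fuel : Nat) (vals : List Int) (ti : Nat) (l r : Int) (t : Nat → Int),
    (r - l).toNat < fuel → 0 ≤ l → l ≤ r → r < (vals.length : Int) →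
    InvOn (buildSeg fuel vals ti l r t).1 (vals.map maskBit) ti l r
    ∧ (buildSeg fuel vals ti l r t).2 = sumMask (vals.map maskBit) l r
    ∧ (∀ j, ¬ desc ti j → (buildSeg fuel vals ti l r t).1 j = t j) := by
  intro fuel
  induction fuel with
  | zero => omega
  | succ fuel ih =>
    intro vals ti l r t hf h0 hlr hlen
    by_cases heq : l = r
    · subst heq
      simp only [buildSeg, if_pos (beq_self_eq_true l)]
      have hv : (if primeAt (PySem.List.pyGetD vals l 0) then (1:Int) else 0)
          = sumMask (vals.map maskBit) l l := by
        rw [sumMask_singleton, pyGetD_map_in maskBit h0 hlen 0 0, maskBit]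
      refine ⟨?_, by simpa using hv, ?_⟩
      · rw [invOn_iff]
        exact ⟨by simpa [Function.update_self] using hv, fun h => absurd h (by omega)⟩
      · intro j hj
        have : j ≠ ti := fun h => hj (h ▸ desc_refl ti)
        simp [Function.update_of_ne this]
    · have hlr' : l < r := by omega
      have hm := segMid_bounds hlr'
      have hne : ¬((l == r) = true) := by simpa using heq
      simp only [buildSeg, if_neg hne]
      obtain ⟨ih1, iv1, if1⟩ := ih vals (2 * ti + 1) l (segMid l r) t (by omega) h0 (by omega) (by omega)
      obtain ⟨ih2, iv2, if2⟩ := ih vals (2 * ti + 2) (segMid l r + 1) r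
        (buildSeg fuel vals (2 * ti + 1) l (segMid l r) t).1 (by omega) (by omega) (by omega) hlen
      set t1 := (buildSeg fuel vals (2 * ti + 1) l (segMid l r) t).1 with ht1
      set t2 := (buildSeg fuel vals (2 * ti + 2) (segMid l r + 1) r t1).1 with ht2
      have hsum : (buildSeg fuel vals (2 * ti + 1) l (segMid l r) t).2
          + (buildSeg fuel vals (2 * ti + 2) (segMid l r + 1) r t1).2
          = sumMask (vals.map maskBit) l r := by
        rw [iv1, iv2]
        have e := sumMask_split (vals.map maskBit) (a := l) (b := r) (segMid l r + 1) (by omega) (by omega)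
        rw [show segMid l r + 1 - 1 = segMid l r by ring] at e
        linarith
      -- child-1 invariant survives child-2 build and the root write
      have h1' : InvOn t2 (vals.map maskBit) (2 * ti + 1) l (segMid l r) := by
        apply invOn_congr_tree (fuel + 1) (by omega) _ ih1
        intro j hj
        exact if2 j (fun hd => desc_disjoint hj hd)
      refine ⟨?_, by simp [hsum], ?_⟩
      · rw [invOn_iff]
        constructor
        · simpa [Function.update_self] using hsum
        · intro _
          constructor
          · apply invOn_congr_tree (fuel + 1) (by omega) _ h1'
            intro j hj
            exact Function.update_of_ne (ne_of_desc_left hj) _ _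
          · apply invOn_congr_tree (fuel + 1) (by omega) _ ih2
            intro j hj
            exact Function.update_of_ne (ne_of_desc_right hj) _ _
      · intro j hj
        have hne : j ≠ ti := fun h => hj (h ▸ desc_refl ti)
        rw [Function.update_of_ne hne, if2 j (not_desc_right hj), if1 j (not_desc_left hj)]

lemma updateSeg_inv : ∀ (fuel : Nat) {t : Nat → Int} {m m' : List Int} {ti : Nat} {l r idx diff : Int},
    (r - l).toNat < fuel → l ≤ r →
    InvOn t m ti l r →
    (∀ x, l ≤ x → x ≤ r →
      PySem.List.pyGetD m' x 0 = PySem.List.pyGetD m x 0 + (if x = idx then diff else 0)) →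
    InvOn (updateSeg fuel t ti l r idx diff) m' ti l r
    ∧ (∀ j, ¬ desc ti j → updateSeg fuel t ti l r idx diff j = t j) := by
  intro fuel
  induction fuel with
  | zero => omega
  | succ fuel ih =>
    intro t m m' ti l r idx diff hf hlr hInv hm'
    by_cases hout : idx < l ∨ idx > r
    · constructor
      · simp only [updateSeg, if_pos hout]
        apply invOn_congr_mask (fuel + 1) (by omega) _ hInv
        intro x h1 h2
        rw [hm' x h1 h2, if_neg (by omega)]; ring
      · intro j _
        simp only [updateSeg, if_pos hout]
    · simp only [updateSeg, if_neg hout]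
      have hidx : l ≤ idx ∧ idx ≤ r := by omega
      by_cases heq : l = r
      · subst heq
        simp only [if_neg (by simp : ¬(l ≠ l))]
        constructor
        · rw [invOn_iff]
          refine ⟨?_, fun h => absurd h (by omega)⟩
          rw [Function.update_self, (invOn_iff _ _ _ _ _).mp hInv |>.1,
              sumMask_singleton, sumMask_singleton, hm' l (by omega) (by omega)]
          have : idx = l := by omega
          simp [this]
        · intro j hj
          exact Function.update_of_ne (fun h => hj (by rw [h]; exact desc_refl ti)) _ _
      · simp only [if_pos (show l ≠ r from heq)]
        have hlr' : l < r := by omega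
        have hmb := segMid_bounds hlr'
        rw [invOn_iff] at hInv
        obtain ⟨hroot, hch⟩ := hInv
        obtain ⟨hc1, hc2⟩ := hch hlr'
        set t' := Function.update t ti (t ti + diff) with ht'
        -- children of t' still satisfy the m-invariant
        have hc1' : InvOn t' m (2 * ti + 1) l (segMid l r) :=
          invOn_congr_tree (fuel + 1) (by omega)
            (fun j hj => Function.update_of_ne (ne_of_desc_left hj) _ _) hc1
        have hc2' : InvOn t' m (2 * ti + 2) (segMid l r + 1) r :=
          invOn_congr_tree (fuel + 1) (by omega)
            (fun j hj => Function.update_of_ne (ne_of_desc_right hj) _ _) hc2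
        obtain ⟨iu1, fu1⟩ := ih (by omega) (by omega) hc1'
          (fun x h1 h2 => hm' x (by omega) (by omega))
        set t1 := updateSeg fuel t' (2 * ti + 1) l (segMid l r) idx diff with ht1
        have hc2'' : InvOn t1 m (2 * ti + 2) (segMid l r + 1) r :=
          invOn_congr_tree (fuel + 1) (by omega)
            (fun j hj => fu1 j (fun hd => desc_disjoint hd hj)) hc2'
        obtain ⟨iu2, fu2⟩ := ih (by omega) (by omega) hc2''
          (fun x h1 h2 => hm' x (by omega) (by omega))
        set t2 := updateSeg fuel t1 (2 * ti + 2) (segMid l r + 1) r idx diff with ht2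
        constructor
        · rw [invOn_iff]
          constructor
          · have e1 : t2 ti = t' ti := by
              rw [fu2 ti (fun hd => by have := desc_le hd; omega),
                  fu1 ti (fun hd => by have := desc_le hd; omega)]
            rw [e1, ht', Function.update_self, hroot, sumMask_add_at hm', if_pos hidx]
          · intro _
            refine ⟨?_, iu2⟩
            exact invOn_congr_tree (fuel + 1) (by omega)
              (fun j hj => fu2 j (fun hd => desc_disjoint hj hd)) iu1
        · intro j hj
          rw [fu2 j (not_desc_right hj), fu1 j (not_desc_left hj)]
          exact Function.update_of_ne (fun h => hj (by rw [h]; exact desc_refl ti)) _ _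

lemma querySeg_eval : ∀ (fuel : Nat) {t : Nat → Int} {m : List Int} {ti : Nat} {l r lR rR : Int},
    (r - l).toNat < fuel → l ≤ r → InvOn t m ti l r →
    querySeg fuel t lR rR ti l r = sumMask m (max lR l) (min rR r) := by
  intro fuel
  induction fuel with
  | zero => omega
  | succ fuel ih =>
    intro t m ti l r lR rR hf hlr hInv
    rw [invOn_iff] at hInv
    by_cases hfull : lR ≤ l ∧ rR ≥ r
    · simp only [querySeg, if_pos hfull]
      rw [hInv.1, show max lR l = l by omega, show min rR r = r by omega]
    · simp only [querySeg, if_neg hfull]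
      by_cases hdis : r < lR ∨ l > rR
      · rw [if_pos hdis, sumMask_empty m (show min rR r < max lR l by omega)]
      · rw [if_neg hdis]
        have hlr' : l < r := by omega
        have hmb := segMid_bounds hlr'
        obtain ⟨hc1, hc2⟩ := hInv.2 hlr'
        rw [ih (by omega) (by omega) hc1, ih (by omega) (by omega) hc2]
        have e := sumMask_clamp_split m (max lR l) (min rR r) (segMid l r)
        rw [show min (min rR r) (segMid l r) = min rR (segMid l r) by omega,
            show max (max lR l) (segMid l r + 1) = max lR (segMid l r + 1) by omega] at e
        rw [show max lR (segMid l r + 1) = max (max lR l) (segMid l r + 1) by omega] at e ⊢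
        rw [show min rR (segMid l r) = min (min rR r) (segMid l r) by omega] at e ⊢
        exact e

lemma sliceSum_eq_sumMask (m : List Int) {lo hi : Int} (h0 : 0 ≤ lo)
    (hhi : hi < (m.length : Int)) : sliceSum m lo hi = sumMask m lo hi := by
  unfold sliceSum
  by_cases h : hi ≥ lo
  · rw [if_pos h, PySem.List.slice_toNat m h0 (by omega)]
    unfold sumMask
    congr 1
    apply List.ext_getElem
    · simp [PySem.List.length_pyRange_one]
      omega
    · intro k hk1 hk2
      simp only [List.getElem_take, List.getElem_drop, List.getElem_map,
        PySem.List.getElem_pyRange_one]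
      rw [PySem.List.pyGetD_eq_getElem m 0 (by omega)
        (by simp [PySem.List.length_pyRange_one] at hk2; omega)]
      congr 1
      simp [PySem.List.length_pyRange_one] at hk2
      omega
  · rw [if_neg h, sumMask_empty m (by omega)]

lemma pyGetD_set_nonneg {m : List Int} {k : Nat} (hk : k < m.length) {x : Int} (hx : 0 ≤ x) (v : Int) :
    PySem.List.pyGetD (m.set k v) x 0 = if x = (k : Int) then v else PySem.List.pyGetD m x 0 := by
  have hxn : x = ((x.toNat : Nat) : Int) := by omega
  rw [hxn, PySem.List.pyGetD_natCast, PySem.List.pyGetD_natCast]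
  by_cases hxk : x.toNat = k
  · subst hxk
    rw [if_pos rfl]
    simp [List.getD, hk]
  · rw [if_neg (by omega)]
    simp [List.getD, List.getElem?_set_ne (by omega : k ≠ x.toNat)]

structure PVRel (nA : Nat) (s : List Int × (Nat → Int) × List Int) (sb : List Int × List Int) : Prop where
  len : s.1.length = nA
  mask : sb.1 = s.1.map maskBit
  inv : InvOn s.2.1 sb.1 0 0 ((nA : Int) - 1)
  res : s.2.2 = sb.2

lemma foldl_rel {α β γ : Type} {f : α → γ → α} {g : β → γ → β} {R : α → β → Prop}
    (h : ∀ a b c, R a b → R (f a c) (g b c)) :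
    ∀ (l : List γ) (a : α) (b : β), R a b → R (l.foldl f a) (l.foldl g b) := by
  intro l
  induction l with
  | nil => intro a b hr; simpa using hr
  | cons x xs ih => intro a b hr; simpa using ih (f a x) (g b x) (h a b x hr)

lemma step_rel (Bs : List String) (Cs Ds : List Int) (nA : Nat) (h1 : 1 ≤ nA)
    (s : List Int × (Nat → Int) × List Int) (sb : List Int × List Int) (i : Int)
    (hrel : PVRel nA s sb) :
    PVRel nA (stepA Bs Cs Ds (nA : Int) (((nA : Int) - 1).toNat + 1) s i)
      (stepB Bs Cs Ds (nA : Int) sb i) := by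
  obtain ⟨hlen, hmask, hInv, hres⟩ := hrel
  have hblen : sb.1.length = nA := by rw [hmask, List.length_map, hlen]
  simp only [stepA, stepB, updateValue]
  set c := PySem.List.pyGetD Cs i 0 with hc
  set v := PySem.List.pyGetD Ds i 0 with hv
  by_cases hop : (PySem.List.pyGetD Bs i "" == "C") = true
  · rw [if_pos hop, if_pos hop]
    by_cases hin : c - 1 < 0 ∨ c - 1 > (nA : Int) - 1
    · rw [if_pos hin, if_neg (show ¬((0:Int) ≤ c - 1 ∧ c - 1 < (nA : Int)) from by omega)]
      exact ⟨hlen, hmask, hInv, hres⟩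
    · rw [if_neg hin, if_pos (show (0:Int) ≤ c - 1 ∧ c - 1 < (nA : Int) from by omega)]
      have hc0 : 0 ≤ c - 1 := by omega
      have hcn : c - 1 < (nA : Int) := by omega
      set old := PySem.List.pyGetD s.1 (c - 1) 0 with hold
      have hkb : (c - 1).toNat < sb.1.length := by omega
      have hcast : (((c - 1).toNat : Nat) : Int) = c - 1 := by omega
      have hentry : PySem.List.pyGetD sb.1 (c - 1) 0 = maskBit old := by
        rw [hmask, pyGetD_map_in maskBit hc0 (by omega) 0 0]
      have hmapset : (s.1.set (c - 1).toNat v).map maskBit = sb.1.set (c - 1).toNat (maskBit v) := by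
        rw [List.map_set, hmask]
      have hsetlen : (s.1.set (c - 1).toNat v).length = nA := by
        rw [List.length_set, hlen]
      have hpt : ∀ (d : Int), maskBit v = maskBit old + d →
          ∀ x, (0:Int) ≤ x → x ≤ (nA : Int) - 1 →
          PySem.List.pyGetD (sb.1.set (c - 1).toNat (maskBit v)) x 0
            = PySem.List.pyGetD sb.1 x 0 + (if x = c - 1 then d else 0) := by
        intro d hd x hx0 hx1
        rw [pyGetD_set_nonneg hkb hx0, hcast]
        by_cases hxe : x = c - 1
        · rw [if_pos hxe, if_pos hxe, hxe, hentry, hd]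
        · rw [if_neg hxe, if_neg hxe]; ring
      by_cases pa : primeAt old = true
      · by_cases pb : primeAt v = true
        · rw [if_pos (show (primeAt old && primeAt v) = true from by rw [pa, pb]; rfl)]
          refine ⟨hsetlen, hmapset.symm, ?_, hres⟩
          apply invOn_congr_mask (((nA : Int) - 1).toNat + 1) (by omega) _ hInv
          intro x hx0 hx1
          have := hpt 0 (by simp [maskBit, pa, pb]) x hx0 hx1
          simpa using this
        · rw [if_neg (show ¬((primeAt old && primeAt v) = true) from by simp [pb]),
              if_neg (show ¬((!primeAt old && !primeAt v) = true) from by simp [pa])]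
          refine ⟨hsetlen, hmapset.symm, ?_, hres⟩
          rw [show (if (!primeAt old && primeAt v) = true then (1:Int)
                else if (primeAt old && !primeAt v) = true then (-1:Int) else 0) = -1 from by
              simp [pa, pb]]
          exact (updateSeg_inv (((nA : Int) - 1).toNat + 1) (by omega) (by omega) hInv
            (hpt (-1) (by simp [maskBit, pa, pb]))).1
      · by_cases pb : primeAt v = true
        · rw [if_neg (show ¬((primeAt old && primeAt v) = true) from by simp [pa]),
              if_neg (show ¬((!primeAt old && !primeAt v) = true) from by simp [pb])]
          refine ⟨hsetlen, hmapset.symm, ?_, hres⟩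
          rw [show (if (!primeAt old && primeAt v) = true then (1:Int)
                else if (primeAt old && !primeAt v) = true then (-1:Int) else 0) = 1 from by
              simp [pa, pb]]
          exact (updateSeg_inv (((nA : Int) - 1).toNat + 1) (by omega) (by omega) hInv
            (hpt 1 (by simp [maskBit, pa, pb]))).1
        · rw [if_neg (show ¬((primeAt old && primeAt v) = true) from by simp [pa]),
              if_pos (show (!primeAt old && !primeAt v) = true from by simp [pa, pb])]
          refine ⟨hsetlen, hmapset.symm, ?_, hres⟩
          apply invOn_congr_mask (((nA : Int) - 1).toNat + 1) (by omega) _ hInv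
          intro x hx0 hx1
          have := hpt 0 (by simp [maskBit, pa, pb]) x hx0 hx1
          simpa using this
  · rw [if_neg hop, if_neg hop]
    refine ⟨hlen, hmask, hInv, ?_⟩
    rw [hres, querySeg_eval (((nA : Int) - 1).toNat + 1) (by omega) (by omega) hInv,
        sliceSum_eq_sumMask sb.1 (by omega) (by omega)]

lemma solve_eq (A : List Int) (B : List String) (C : List Int) (D : List Int)
    (hpre : Pre_solve A B C D) : solve A B C D = solve_alt A B C D := by
  have hA : 1 ≤ A.length := by
    rcases hpre with ⟨h, -⟩
    cases A with
    | nil => exact absurd rfl h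
    | cons a t => simp
  unfold solve solve_alt
  dsimp only
  have hb := buildSeg_inv (((A.length : Int) - 1).toNat + 1) A 0 0 ((A.length : Int) - 1)
    (fun _ => 0) (by omega) (by omega) (by omega) (by omega)
  have h0 : PVRel A.length
      (A, (buildSeg (((A.length : Int) - 1).toNat + 1) A 0 0 ((A.length : Int) - 1) (fun _ => 0)).1, [])
      (A.map maskBit, []) := ⟨rfl, rfl, hb.1, rfl⟩
  exact (foldl_rel (step_rel B C D A.length hA)
    (PySem.List.pyRange 0 (B.length : Int) 1) _ _ h0).res

-- ===== VERDICT (by name: the statement is the Claim_ definition above) =====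
theorem solve_spec : Claim_equal_solve := by
  intro A B C D _ hpre
  exact solve_eq A B C D hpre
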